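-- pv_equiv track=rewrite | github.com/Munklinde96/Data_Visualization | app_viz/utils.py | add_trailing_white_spaces_to_chars
-- ===== SOURCE A (Python) =====
-- def add_trailing_white_spaces_to_chars(seq_list):
--     # equal to number of time char is seen in the sequence
--     res_list = seq_list
--     char_count_dict = {}
--     counter = 0
--     for char in seq_list:
--         if char in char_count_dict:
--             res_list[counter] = char + " "*char_count_dict[char]
--             char_count_dict[char] += 1
--         else:
--             char_count_dict[char] = 1
--         counter += 1
--     return res_list
-- ===== SOURCE B (Python) =====
-- def add_trailing_white_spaces_to_chars(seq_list):
--     # Group positions by character first, then rewrite each repeated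
--     # occurrence (group index k > 0) as char + k spaces, in place.
--     positions = {}
--     for i, ch in enumerate(seq_list):
--         positions.setdefault(ch, []).append(i)
--     for ch, idxs in positions.items():
--         for k, i in enumerate(idxs):
--             if k:
--                 seq_list[i] = ch + " " * k
--     return seq_list
-- ===== Notes on version B (the rewrite author's own statement) =====
-- stated objective: alternative
-- what changed: Instead of a single sequential pass maintaining a running per-char counter dict and rewriting as it goes, B first groups all positions by character (dict char -> list of indices) and then, per character group, rewrites each position with group index k>0 to char + k spaces.
import Mathlib
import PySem

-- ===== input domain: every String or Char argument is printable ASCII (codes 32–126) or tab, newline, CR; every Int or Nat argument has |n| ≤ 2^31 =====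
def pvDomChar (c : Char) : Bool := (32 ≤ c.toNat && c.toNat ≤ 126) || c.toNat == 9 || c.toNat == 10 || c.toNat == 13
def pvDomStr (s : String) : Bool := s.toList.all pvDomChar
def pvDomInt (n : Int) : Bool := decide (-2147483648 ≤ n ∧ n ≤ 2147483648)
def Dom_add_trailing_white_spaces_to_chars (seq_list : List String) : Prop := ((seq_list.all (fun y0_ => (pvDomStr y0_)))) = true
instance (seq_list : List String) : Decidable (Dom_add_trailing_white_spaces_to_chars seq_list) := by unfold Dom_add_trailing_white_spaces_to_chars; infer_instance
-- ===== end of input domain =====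

-- B groups positions by character first and then rewrites each repeated occurrence per
-- group, instead of A's single sequential pass with a running counter dict (objective:
-- alternative decomposition, same cost). Both A and B mutate seq_list in place in Python;
-- the equivalence proved here is about the returned list of values.


-- ===== PORT A =====
-- " " * k  (k ≥ 0)
def pvSpaces (k : Nat) : String := String.ofList (List.replicate k ' ')

-- the body of A's for-loop; state = (res_list, char_count_dict, counter)
def pvStepA (st : List String × PySem.Dict String Int × Int) (char : String) :
    List String × PySem.Dict String Int × Int :=
  match st.2.1.get? char with
  | some c =>
      (PySem.List.pySetD st.1 st.2.2 (char ++ pvSpaces c.toNat),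
       st.2.1.insert char (c + 1), st.2.2 + 1)
  | none => (st.1, st.2.1.insert char 1, st.2.2 + 1)

-- Python's `for char in seq_list` reads index `counter` before the loop body overwrites
-- exactly that index, so iterating over the original elements is exact.
def add_trailing_white_spaces_to_chars (seq_list : List String) : List String :=
  (seq_list.foldl pvStepA (seq_list, PySem.Dict.empty, 0)).1

-- ===== PORT B =====
-- positions.setdefault(ch, []).append(i)
def pvGroupStep (d : PySem.Dict String (List Int)) (p : Int × String) :
    PySem.Dict String (List Int) :=
  d.modify p.2 [] (fun l => l ++ [p.1])

-- inner loop: for k, i in enumerate(idxs): if k: seq_list[i] = ch + " " * k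
def pvWriteGroup (res : List String) (q : String × List Int) : List String :=
  (PySem.List.enumerate q.2 0).foldl
    (fun r p => if p.1 ≠ 0 then PySem.List.pySetD r p.2 (q.1 ++ pvSpaces p.1.toNat) else r)
    res

def add_trailing_white_spaces_to_chars_alt (seq_list : List String) : List String :=
  let positions := (PySem.List.enumerate seq_list 0).foldl pvGroupStep PySem.Dict.empty
  positions.items.foldl pvWriteGroup seq_list

-- ===== PRECONDITION & SPEC =====
def Spec_add_trailing_white_spaces_to_chars (seq_list : List String) (out : List String) : Prop := out = add_trailing_white_spaces_to_chars_alt seq_list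
instance (seq_list : List String) (out : List String) : Decidable (Spec_add_trailing_white_spaces_to_chars seq_list out) := by unfold Spec_add_trailing_white_spaces_to_chars; infer_instance

-- ===== CLAIM (what is proved, stated in full; the proofs are below) =====
def Claim_equal_add_trailing_white_spaces_to_chars : Prop := ∀ (seq_list : List String), Dom_add_trailing_white_spaces_to_chars seq_list → Spec_add_trailing_white_spaces_to_chars seq_list (add_trailing_white_spaces_to_chars seq_list)

-- ===== LEMMAS AND PROOFS =====

def pvApply (s : String) (k : Nat) : String := if k = 0 then s else s ++ pvSpaces k
def pvOutAux : List String → List String → List String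
  | _, [] => []
  | pre, c :: suf => pvApply c (pre.count c) :: pvOutAux (pre ++ [c]) suf

theorem pvOutAux_length : ∀ (suf pre : List String), (pvOutAux pre suf).length = suf.length := by
  intro suf
  induction suf with
  | nil => intro pre; rfl
  | cons c suf ih => intro pre; simp [pvOutAux, ih]

theorem pvOutAux_append : ∀ (s t pre : List String),
    pvOutAux pre (s ++ t) = pvOutAux pre s ++ pvOutAux (pre ++ s) t := by
  intro s
  induction s with
  | nil => intro t pre; simp [pvOutAux]
  | cons c s ih => intro t pre; simp [pvOutAux, ih]

theorem pvOutAux_getElem? : ∀ (suf pre : List String) (j : Nat) (hj : j < suf.length),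
    (pvOutAux pre suf)[j]? = some (pvApply suf[j] ((pre ++ suf.take j).count suf[j])) := by
  intro suf
  induction suf with
  | nil => intro pre j hj; simp at hj
  | cons c suf ih =>
    intro pre j hj
    cases j with
    | zero => simp [pvOutAux]
    | succ j =>
      simp only [pvOutAux, List.getElem?_cons_succ, List.getElem_cons_succ, List.take_succ_cons]
      rw [ih (pre ++ [c]) j (by simpa using hj)]
      simp

theorem pvA_loop : ∀ (suf pre : List String) (d : PySem.Dict String Int),
    (∀ ch : String, d.get? ch = if pre.count ch = 0 then none else some ((pre.count ch : Int))) →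
    (suf.foldl pvStepA (pvOutAux [] pre ++ suf, d, (pre.length : Int))).1
      = pvOutAux [] pre ++ pvOutAux pre suf := by
  intro suf
  induction suf with
  | nil => intro pre d hd; simp [pvOutAux]
  | cons c suf ih =>
    intro pre d hd
    have hout : pvOutAux [] (pre ++ [c]) = pvOutAux [] pre ++ [pvApply c (pre.count c)] := by
      rw [pvOutAux_append]; simp [pvOutAux]
    by_cases hc : pre.count c = 0
    · have hstep : pvStepA (pvOutAux [] pre ++ c :: suf, d, (pre.length : Int)) c
          = (pvOutAux [] pre ++ c :: suf, d.insert c 1, (pre.length : Int) + 1) := by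
        simp [pvStepA, hd c, hc]
      rw [List.foldl_cons, hstep]
      have hres : pvOutAux [] pre ++ c :: suf = pvOutAux [] (pre ++ [c]) ++ suf := by
        rw [hout]; simp [pvApply, hc]
      have hlen : (pre.length : Int) + 1 = ((pre ++ [c]).length : Int) := by simp
      have hd' : ∀ ch : String, (d.insert c 1).get? ch
          = if (pre ++ [c]).count ch = 0 then none else some (((pre ++ [c]).count ch : Int)) := by
        intro ch
        by_cases hch : ch = c
        · subst hch
          rw [PySem.Dict.get?_insert_self]
          simp [List.count_append, hc]
        · rw [PySem.Dict.get?_insert_of_ne _ _ hch, hd ch]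
          have hcc : ¬ c = ch := fun h => hch h.symm
          simp [List.count_append, hcc]
      rw [hres, hlen, ih (pre ++ [c]) _ hd', hout]
      simp only [pvOutAux, List.append_assoc, List.singleton_append]
    · have hstep : pvStepA (pvOutAux [] pre ++ c :: suf, d, (pre.length : Int)) c
          = (PySem.List.pySetD (pvOutAux [] pre ++ c :: suf) (pre.length : Int)
               (c ++ pvSpaces (pre.count c)),
             d.insert c ((pre.count c : Int) + 1), (pre.length : Int) + 1) := by
        simp [pvStepA, hd c, hc]
      rw [List.foldl_cons, hstep]
      have hres : PySem.List.pySetD (pvOutAux [] pre ++ c :: suf) (pre.length : Int)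
            (c ++ pvSpaces (pre.count c)) = pvOutAux [] (pre ++ [c]) ++ suf := by
        rw [PySem.List.pySetD_natCast]
        have hl : pre.length = (pvOutAux [] pre).length := (pvOutAux_length pre []).symm
        rw [hl, List.set_append_right _ _ (Nat.le_refl _), hout]
        simp [pvApply, hc]
      have hlen : (pre.length : Int) + 1 = ((pre ++ [c]).length : Int) := by simp
      have hd' : ∀ ch : String, (d.insert c ((pre.count c : Int) + 1)).get? ch
          = if (pre ++ [c]).count ch = 0 then none else some (((pre ++ [c]).count ch : Int)) := by
        intro ch
        by_cases hch : ch = c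
        · subst hch
          rw [PySem.Dict.get?_insert_self]
          simp [List.count_append, hc]
        · rw [PySem.Dict.get?_insert_of_ne _ _ hch, hd ch]
          have hcc : ¬ c = ch := fun h => hch h.symm
          simp [List.count_append, hcc]
      rw [hres, hlen, ih (pre ++ [c]) _ hd', hout]
      simp only [pvOutAux, List.append_assoc, List.singleton_append]

theorem pvA_eq : ∀ seq : List String,
    add_trailing_white_spaces_to_chars seq = pvOutAux [] seq := by
  intro seq
  have h := pvA_loop seq [] PySem.Dict.empty (by intro ch; rfl)
  simpa [add_trailing_white_spaces_to_chars, pvOutAux] using h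

def pvGrp (L : List (Int × String)) (ch : String) : List Int :=
  (L.filter (fun p => p.2 == ch)).map (·.1)

def pvPos (seq : List String) (ch : String) : List Int :=
  pvGrp (PySem.List.enumerate seq 0) ch

theorem pvGrp_append (L M : List (Int × String)) (ch : String) :
    pvGrp (L ++ M) ch = pvGrp L ch ++ pvGrp M ch := by
  simp [pvGrp, List.filter_append]

-- find? / contains on a dict whose items are in keyed-map form
theorem pvFind_map_form {α : Type} (ks : List String) (g : String → α) (k : String) :
    List.find? (fun q => q.1 == k) (ks.map (fun ch => (ch, g ch)))
      = if k ∈ ks then some (k, g k) else none := by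
  induction ks with
  | nil => simp
  | cons c ks ih =>
    by_cases hck : c = k
    · subst hck; simp
    · simp only [List.map_cons, List.find?_cons]
      have : ((c, g c).1 == k) = false := by simpa using hck
      rw [this]
      simp [ih, List.mem_cons, Ne.symm hck]

theorem pvContains_map_form {α : Type} (ks : List String) (g : String → α) (k : String) :
    (PySem.Dict.mk (ks.map (fun ch => (ch, g ch)))).contains k = decide (k ∈ ks) := by
  simp only [PySem.Dict.contains, List.any_map]
  by_cases h : k ∈ ks
  · simp only [h, decide_true]
    simp only [List.any_eq_true, Function.comp_apply, beq_iff_eq]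
    exact ⟨k, h, rfl⟩
  · simp only [h, decide_false]
    simp only [List.any_eq_false, Function.comp_apply, beq_iff_eq]
    intro x hx hxk
    exact absurd (hxk ▸ hx) h

theorem pvGrp_nil_of_not_mem (L : List (Int × String)) (ch : String)
    (h : ch ∉ L.map (·.2)) : pvGrp L ch = [] := by
  unfold pvGrp
  rw [List.filter_eq_nil_iff.mpr, List.map_nil]
  intro q hq hqc
  have hq2 : q.2 = ch := by simpa using hqc
  exact h (hq2 ▸ List.mem_map_of_mem hq)

theorem pvDedup_append_singleton (xs : List String) (x : String) :
    PySem.List.dedup (xs ++ [x])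
      = if x ∈ PySem.List.dedup xs then PySem.List.dedup xs else PySem.List.dedup xs ++ [x] := by
  show PySem.Set.ofList (xs ++ [x]) = _
  rw [PySem.Set.ofList, List.foldl_append]
  show PySem.Set.add _ x = _
  rw [PySem.Set.add, PySem.Set.contains]
  show (if List.contains (PySem.List.dedup xs) x = true then PySem.List.dedup xs
        else PySem.List.dedup xs ++ [x])
      = if x ∈ PySem.List.dedup xs then PySem.List.dedup xs else PySem.List.dedup xs ++ [x]
  simp

theorem pvGroup_items : ∀ L : List (Int × String),
    (L.foldl pvGroupStep PySem.Dict.empty).items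
      = (PySem.List.dedup (L.map (·.2))).map (fun ch => (ch, pvGrp L ch)) := by
  intro L
  induction L using List.reverseRecOn with
  | nil => rfl
  | append_singleton L p ih =>
    rw [List.foldl_append, List.foldl_cons, List.foldl_nil]
    set d := L.foldl pvGroupStep PySem.Dict.empty with hd
    set ks := PySem.List.dedup (L.map (·.2)) with hks
    -- d in map form
    have hitems : d.items = ks.map (fun ch => (ch, pvGrp L ch)) := ih
    have hget : ∀ k, d.get? k = if k ∈ ks then some (pvGrp L k) else none := by
      intro k
      show Option.map _ (List.find? _ d.items) = _
      rw [hitems, pvFind_map_form]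
      by_cases h : k ∈ ks <;> simp [h]
    have hcontains : ∀ k, d.contains k = decide (k ∈ ks) := by
      intro k
      rw [PySem.Dict.contains, hitems, ← PySem.Dict.contains, pvContains_map_form]
    have hmem : p.2 ∈ ks ↔ p.2 ∈ L.map (·.2) := PySem.List.mem_dedup _ _
    show (d.insert p.2 (d.getD p.2 [] ++ [p.1])).items = _
    have hdedup := pvDedup_append_singleton (L.map (·.2)) p.2
    have hmap2 : (L ++ [p]).map (·.2) = L.map (·.2) ++ [p.2] := by simp
    by_cases hp2 : p.2 ∈ ks
    · -- key present: in-place update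
      have hgetD : d.getD p.2 [] = pvGrp L p.2 := by
        show (d.get? p.2).getD [] = _
        rw [hget, if_pos hp2]; rfl
      rw [PySem.Dict.insert, if_pos (by rw [hcontains]; simpa using hp2)]
      simp only [hmap2, hdedup, if_pos hp2, ← hks]
      rw [hitems, hgetD, List.map_map]
      apply List.map_congr_left
      intro ch _
      by_cases hchp : ch = p.2
      · subst hchp
        simp [pvGrp]
      · have h1 : ((ch, pvGrp L ch).1 == p.2) = false := by simpa using hchp
        simp only [Function.comp_apply, h1, Bool.false_eq_true, if_false]
        rw [pvGrp_append]
        have : pvGrp [p] ch = [] := by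
          apply pvGrp_nil_of_not_mem; simpa using hchp
        simp [this]
    · -- new key: appended at the end
      have hgetD : d.getD p.2 [] = [] := by
        show (d.get? p.2).getD [] = _
        rw [hget, if_neg hp2]; rfl
      rw [PySem.Dict.insert, if_neg (by rw [hcontains]; simpa using hp2)]
      simp only [hmap2, hdedup, if_neg hp2, ← hks]
      rw [hitems, hgetD, List.map_append]
      congr 1
      · apply List.map_congr_left
        intro ch hch
        rw [pvGrp_append]
        have : pvGrp [p] ch = [] := by
          apply pvGrp_nil_of_not_mem
          intro hc
          apply hp2
          have : ch = p.2 := by simpa using hc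
          exact this ▸ hch
        simp [this]
      · have h1 : pvGrp (L ++ [p]) p.2 = [p.1] := by
          rw [pvGrp_append, pvGrp_nil_of_not_mem _ _ (fun h => hp2 (hmem.mpr h))]
          simp [pvGrp]
        simp [h1]

theorem pvPos_length (seq : List String) (ch : String) :
    (pvPos seq ch).length = seq.count ch := by
  rw [pvPos, pvGrp, List.length_map, ← List.countP_eq_length_filter]
  have h1 : (PySem.List.enumerate seq 0).countP (fun p => p.2 == ch)
      = ((PySem.List.enumerate seq 0).map (·.2)).countP (fun s => s == ch) := by
    rw [List.countP_map]; rfl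
  rw [h1, PySem.List.map_snd_enumerate, List.count]

theorem pvPos_mem (seq : List String) (ch : String) (m : Nat) :
    ((m : Int) ∈ pvPos seq ch) ↔ ∃ hm : m < seq.length, seq[m] = ch := by
  rw [pvPos, pvGrp]
  simp only [List.mem_map, List.mem_filter, PySem.List.mem_enumerate_iff]
  constructor
  · rintro ⟨p, ⟨⟨k, hk, hp⟩, hpc⟩, hp1⟩
    subst hp
    simp only at hp1 hpc
    have hkm : k = m := by omega
    subst hkm
    exact ⟨hk, by simpa using hpc⟩
  · rintro ⟨hm, hc⟩
    exact ⟨((m : Int), seq[m]), ⟨⟨m, hm, by simp⟩, by simpa using hc⟩, rfl⟩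

theorem pvPos_spec : ∀ (seq : List String) (ch : String) (k : Nat),
    k < (pvPos seq ch).length →
    ∃ m : Nat, (pvPos seq ch)[k]? = some (m : Int) ∧ ∃ hm : m < seq.length,
      seq[m] = ch ∧ (seq.take m).count ch = k := by
  intro seq
  induction seq using List.reverseRecOn with
  | nil => intro ch k hk; simp [pvPos, pvGrp, PySem.List.enumerate] at hk
  | append_singleton seq c ih =>
    intro ch k hk
    have hsplit : pvPos (seq ++ [c]) ch
        = pvPos seq ch ++ (if c = ch then [(seq.length : Int)] else []) := by
      rw [pvPos, PySem.List.enumerate_append, pvGrp_append, pvPos]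
      congr 1
      by_cases hc : c = ch <;>
        simp [pvGrp, PySem.List.enumerate, hc]
    by_cases hlt : k < (pvPos seq ch).length
    · obtain ⟨m, hm1, hm2, hm3, hm4⟩ := ih ch k hlt
      refine ⟨m, ?_, by simp; omega, ?_, ?_⟩
      · rw [hsplit, List.getElem?_append_left hlt, hm1]
      · exact (List.getElem_append_left hm2).trans hm3
      · rw [List.take_append_of_le_length (by omega)]; exact hm4
    · rw [hsplit] at hk
      have hc : c = ch := by
        by_contra hc
        simp only [if_neg hc, List.append_nil] at hk
        exact hlt hk
      have hklen : k = (pvPos seq ch).length := by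
        simp only [if_pos hc, List.length_append, List.length_cons, List.length_nil] at hk
        omega
      refine ⟨seq.length, ?_, by simp, ?_, ?_⟩
      · rw [hsplit, hklen, if_pos hc, List.getElem?_concat_length]
      · have : (seq ++ [c])[seq.length]'(by simp) = c := by simp
        rw [this, hc]
      · rw [List.take_append_of_le_length (Nat.le_refl _), List.take_length, hklen,
          pvPos_length]

theorem pvInner_length (ch : String) (l : List (Int × Int)) (res : List String) :
    (l.foldl (fun r p => if p.1 ≠ 0 then PySem.List.pySetD r p.2 (ch ++ pvSpaces p.1.toNat) else r)
      res).length = res.length := by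
  induction l generalizing res with
  | nil => rfl
  | cons p l ih =>
    rw [List.foldl_cons, ih]
    by_cases h : p.1 ≠ 0 <;> simp [h, PySem.List.length_pySetD]

theorem pvInner (seq : List String) (ch : String) :
    ∀ (l : List (Int × Int)) (res : List String), res.length = seq.length →
    (∀ p ∈ l, ∃ m : Nat, p.2 = (m : Int) ∧ m < seq.length ∧ (seq.take m).count ch = p.1.toNat ∧ 0 ≤ p.1) →
    ∀ (j : Nat), j < seq.length →
    (l.foldl (fun r p => if p.1 ≠ 0 then PySem.List.pySetD r p.2 (ch ++ pvSpaces p.1.toNat) else r)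
        res)[j]?
      = if ∃ p ∈ l, p.2 = (j : Int) ∧ p.1 ≠ 0
          then some (ch ++ pvSpaces ((seq.take j).count ch))
          else res[j]? := by
  intro l
  induction l with
  | nil => intro res hlen hl j hj; simp
  | cons p l ih =>
    intro res hlen hl j hj
    obtain ⟨m, hm1, hm2, hm3, hm4⟩ := hl p (List.mem_cons_self ..)
    rw [List.foldl_cons]
    set res' := if p.1 ≠ 0 then PySem.List.pySetD res p.2 (ch ++ pvSpaces p.1.toNat) else res with hres'
    have hlen' : res'.length = seq.length := by
      rw [hres']; by_cases h : p.1 ≠ 0 <;> simp [h, PySem.List.length_pySetD, hlen]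
    have hIH := ih res' hlen' (fun q hq => hl q (List.mem_cons_of_mem _ hq)) j hj
    rw [hIH]
    by_cases hrest : ∃ q ∈ l, q.2 = (j : Int) ∧ q.1 ≠ 0
    · obtain ⟨q, hq, hq2⟩ := hrest
      rw [if_pos ⟨q, hq, hq2⟩, if_pos ⟨q, List.mem_cons_of_mem _ hq, hq2⟩]
    · rw [if_neg hrest]
      by_cases hp : p.2 = (j : Int) ∧ p.1 ≠ 0
      · rw [if_pos ⟨p, List.mem_cons_self .., hp⟩]
        have hmj : m = j := by
          have := hp.1; rw [hm1] at this; exact_mod_cast this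
        subst hmj
        rw [hres', if_pos hp.2, hm1, PySem.List.pySetD_natCast,
          List.getElem?_set_self (by omega), ← hm3]
      · have : ¬ ∃ q ∈ p :: l, q.2 = (j : Int) ∧ q.1 ≠ 0 := by
          rintro ⟨q, hq, hq2⟩
          rcases List.mem_cons.mp hq with h | h
          · exact hp (h ▸ hq2)
          · exact hrest ⟨q, h, hq2⟩
        rw [if_neg this, hres']
        by_cases hp0 : p.1 ≠ 0
        · rw [if_pos hp0, hm1, PySem.List.pySetD_natCast]
          apply List.getElem?_set_ne
          intro h
          exact hp ⟨by rw [hm1, h], hp0⟩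
        · rw [if_neg hp0]


theorem pvOuter (seq : List String) :
    ∀ (gs : List String) (res : List String), res.length = seq.length →
    (∀ (j : Nat) (hj : j < seq.length), (seq.take j).count seq[j] = 0 → res[j]? = some seq[j]) →
    ∀ (j : Nat) (hj : j < seq.length),
    (gs.foldl (fun r g => pvWriteGroup r (g, pvPos seq g)) res)[j]?
      = if seq[j] ∈ gs then some (pvApply seq[j] ((seq.take j).count seq[j])) else res[j]? := by
  intro gs
  induction gs with
  | nil => intro res hlen hres0 j hj; simp
  | cons g gs ih =>
    intro res hlen hres0 j hj
    rw [List.foldl_cons]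
    set res' := pvWriteGroup res (g, pvPos seq g) with hres'
    -- the hypotheses of pvInner for the enumerated position list of g
    have hl : ∀ p ∈ PySem.List.enumerate (pvPos seq g) 0,
        ∃ m : Nat, p.2 = (m : Int) ∧ m < seq.length ∧ (seq.take m).count g = p.1.toNat ∧ 0 ≤ p.1 := by
      intro p hp
      obtain ⟨k, hk, hpk⟩ := (PySem.List.mem_enumerate_iff _ _ _).mp hp
      obtain ⟨m, hm1, hm2, hm3, hm4⟩ := pvPos_spec seq g k hk
      refine ⟨m, ?_, hm2, ?_, ?_⟩
      · rw [hpk]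
        simpa using (List.getElem?_eq_getElem hk).symm.trans hm1
      · rw [hpk, hm4]; simp
      · rw [hpk]; simp
    have hinner := pvInner seq g (PySem.List.enumerate (pvPos seq g) 0) res hlen hl
    -- characterise when index j is written by the group of g
    have hiff : ∀ (j : Nat) (hj : j < seq.length),
        (∃ p ∈ PySem.List.enumerate (pvPos seq g) 0, p.2 = (j : Int) ∧ p.1 ≠ 0)
          ↔ (seq[j] = g ∧ (seq.take j).count g ≠ 0) := by
      intro j hj
      constructor
      · rintro ⟨p, hp, hpj, hp0⟩
        obtain ⟨k, hk, hpk⟩ := (PySem.List.mem_enumerate_iff _ _ _).mp hp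
        obtain ⟨m, hm1, hm2, hm3, hm4⟩ := pvPos_spec seq g k hk
        have hpos : (pvPos seq g)[k] = (m : Int) :=
          Option.some.inj ((List.getElem?_eq_getElem hk).symm.trans hm1)
        have hmj : m = j := by
          rw [hpk] at hpj; simp only at hpj
          rw [hpos] at hpj
          exact_mod_cast hpj
        subst hmj
        refine ⟨hm3, ?_⟩
        rw [hm4]
        intro hc
        apply hp0
        rw [hpk]
        simpa using hc
      · rintro ⟨hg, hc⟩
        have hmem : ((j : Int)) ∈ pvPos seq g := (pvPos_mem seq g j).mpr ⟨hj, hg⟩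
        obtain ⟨k, hk, hjk⟩ := List.mem_iff_getElem.mp hmem
        obtain ⟨m, hm1, hm2, hm3, hm4⟩ := pvPos_spec seq g k hk
        have hpos : (pvPos seq g)[k] = (m : Int) :=
          Option.some.inj ((List.getElem?_eq_getElem hk).symm.trans hm1)
        have hmj : m = j := by rw [hjk] at hpos; exact_mod_cast hpos.symm
        refine ⟨((0 : Int) + (k : Int), (pvPos seq g)[k]), ?_, ?_, ?_⟩
        · exact (PySem.List.mem_enumerate_iff _ _ _).mpr ⟨k, hk, rfl⟩
        · simpa using hjk
        · simp only [ne_eq]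
          intro h0
          apply hc
          rw [← hmj] at hc ⊢
          rw [hm4]
          have : (k : Int) = 0 := by simpa using h0
          exact_mod_cast this
    have hres'j : ∀ (j : Nat) (hj : j < seq.length), res'[j]?
        = if seq[j] = g ∧ (seq.take j).count g ≠ 0
            then some (g ++ pvSpaces ((seq.take j).count g)) else res[j]? := by
      intro j hj
      rw [hres', pvWriteGroup]
      rw [hinner j hj]
      by_cases h : seq[j] = g ∧ (seq.take j).count g ≠ 0
      · rw [if_pos ((hiff j hj).mpr h), if_pos h]
      · rw [if_neg (fun hx => h ((hiff j hj).mp hx)), if_neg h]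
    have hlen' : res'.length = seq.length := by
      rw [hres', pvWriteGroup, pvInner_length, hlen]
    have hres0' : ∀ (j : Nat) (hj : j < seq.length),
        (seq.take j).count seq[j] = 0 → res'[j]? = some seq[j] := by
      intro j hj h0
      rw [hres'j j hj]
      by_cases h : seq[j] = g ∧ (seq.take j).count g ≠ 0
      · exact absurd (h.1 ▸ h0) h.2
      · rw [if_neg h]; exact hres0 j hj h0
    rw [ih res' hlen' hres0' j hj]
    by_cases h1 : seq[j] ∈ gs
    · rw [if_pos h1, if_pos (List.mem_cons_of_mem _ h1)]
    · rw [if_neg h1, hres'j j hj]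
      by_cases h2 : seq[j] = g
      · rw [if_pos (List.mem_cons.mpr (Or.inl h2))]
        by_cases h3 : (seq.take j).count g ≠ 0
        · rw [if_pos ⟨h2, h3⟩, pvApply, if_neg (by rw [h2]; exact h3), h2]
        · rw [if_neg (fun hx => h3 hx.2)]
          have h0 : (seq.take j).count seq[j] = 0 := by
            rw [h2]; simpa using h3
          rw [hres0 j hj h0, pvApply, if_pos h0]
      · rw [if_neg (fun hx => (List.mem_cons.mp hx).elim h2 h1),
          if_neg (fun hx => h2 hx.1)]

theorem pvWriteGroup_length (res : List String) (q : String × List Int) :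
    (pvWriteGroup res q).length = res.length := by
  rw [pvWriteGroup, pvInner_length]

theorem pvFold_length (seq : List String) : ∀ (gs : List String) (res : List String),
    (gs.foldl (fun r g => pvWriteGroup r (g, pvPos seq g)) res).length = res.length := by
  intro gs
  induction gs with
  | nil => intro res; rfl
  | cons g gs ih => intro res; rw [List.foldl_cons, ih, pvWriteGroup_length]

theorem pvB_eq : ∀ seq : List String,
    add_trailing_white_spaces_to_chars_alt seq = pvOutAux [] seq := by
  intro seq
  unfold add_trailing_white_spaces_to_chars_alt
  rw [show ((PySem.List.enumerate seq 0).foldl pvGroupStep PySem.Dict.empty).items.foldl pvWriteGroup seq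
        = ((PySem.List.dedup ((PySem.List.enumerate seq 0).map (·.2))).map
            (fun ch => (ch, pvGrp (PySem.List.enumerate seq 0) ch))).foldl pvWriteGroup seq
      from by rw [pvGroup_items]]
  rw [PySem.List.map_snd_enumerate, List.foldl_map]
  show (PySem.List.dedup seq).foldl (fun r g => pvWriteGroup r (g, pvPos seq g)) seq
      = pvOutAux [] seq
  have houter := pvOuter seq (PySem.List.dedup seq) seq rfl
    (fun j hj _ => List.getElem?_eq_getElem hj)
  apply List.ext_getElem?
  intro j
  by_cases hj : j < seq.length
  · rw [houter j hj, pvOutAux_getElem? seq [] j hj]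
    rw [if_pos ((PySem.List.mem_dedup _ _).mpr (List.getElem_mem hj))]
    simp
  · rw [List.getElem?_eq_none (by rw [pvFold_length]; omega),
      List.getElem?_eq_none (by rw [pvOutAux_length]; omega)]

-- ===== VERDICT (by name: the statement is the Claim_ definition above) =====
theorem add_trailing_white_spaces_to_chars_spec : Claim_equal_add_trailing_white_spaces_to_chars := by
  intro seq _
  unfold Spec_add_trailing_white_spaces_to_chars
  rw [pvA_eq, pvB_eq]
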